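-- pv_equiv track=rewrite | github.com/GANESHKUMAR2006/Leet-code-solutions | 2126-destroying-asteroids/2126-destroying-asteroids.py | asteroidsDestroyed
-- ===== SOURCE A (Python) =====
-- from typing import List
--
-- def asteroidsDestroyed(mass: int, asteroids: List[int]) -> bool:
--     asteroids.sort()
--     stack=[mass]
--     for i in range(len(asteroids)):
--         if stack[-1]<asteroids[i]:
--             return False
--         else:
--             stack[-1]+=asteroids[i]
--     return True
-- ===== SOURCE B (Python) =====
-- from typing import List
--
-- def asteroidsDestroyed(mass: int, asteroids: List[int]) -> bool:
--     asteroids.sort()  # in place, like A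
--     # backward pass: minimal sufficient starting mass, independent of `mass`
--     need = None
--     for a in reversed(asteroids):
--         need = a if need is None else max(a, need - a)
--     return need is None or mass >= need
-- ===== Notes on version B (the rewrite author's own statement) =====
-- stated objective: alternative
-- what changed: B replaces A's forward greedy loop carrying the running mass by a backward max-deficit fold over the sorted list that computes the minimal sufficient starting mass (mass never enters the loop), followed by one final comparison mass >= need.
import Mathlib
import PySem

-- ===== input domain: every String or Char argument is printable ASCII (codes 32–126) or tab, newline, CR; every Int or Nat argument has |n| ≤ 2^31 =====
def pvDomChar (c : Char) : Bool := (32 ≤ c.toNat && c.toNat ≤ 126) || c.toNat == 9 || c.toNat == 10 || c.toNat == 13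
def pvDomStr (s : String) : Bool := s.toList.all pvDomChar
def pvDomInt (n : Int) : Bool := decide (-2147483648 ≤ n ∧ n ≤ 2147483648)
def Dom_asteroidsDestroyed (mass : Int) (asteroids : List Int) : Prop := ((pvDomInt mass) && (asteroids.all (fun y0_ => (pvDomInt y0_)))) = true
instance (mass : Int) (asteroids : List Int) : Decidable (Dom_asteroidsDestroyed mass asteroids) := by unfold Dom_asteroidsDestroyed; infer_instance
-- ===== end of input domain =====

-- B computes, by a backward max-deficit fold over the sorted list in which `mass` never
-- appears, the minimal sufficient starting mass, then compares it with `mass` once;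
-- same cost as A's forward greedy. Both sort the argument in place in Python; the
-- equivalence proved is about the return value.


-- ===== PORT A =====
-- the for-loop over the sorted list, carrying the Python `stack` list; stack[-1] via pyGet?
def pvALoop (stack : List Int) : List Int → Bool
  | [] => true
  | a :: rest =>
    match PySem.List.pyGet? stack (-1) with
    | none => false          -- unreachable: stack is never empty
    | some top =>
      if top < a then false
      else pvALoop (stack.dropLast ++ [top + a]) rest

def asteroidsDestroyed (mass : Int) (asteroids : List Int) : Bool :=
  pvALoop [mass] (PySem.List.sorted asteroids (fun x => x))

-- ===== PORT B =====
-- `for a in reversed(sorted)` updating `need`: a foldl over the reversed sorted list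
def asteroidsDestroyed_alt (mass : Int) (asteroids : List Int) : Bool :=
  let sortedA := PySem.List.sorted asteroids (fun x => x)
  let need := (sortedA.reverse).foldl
    (fun acc a => match acc with
      | none => some a
      | some n => some (max a (n - a))) (none : Option Int)
  match need with
  | none => true
  | some n => decide (mass ≥ n)

-- ===== PRECONDITION & SPEC =====
def Spec_asteroidsDestroyed (mass : Int) (asteroids : List Int) (out : Bool) : Prop := out = asteroidsDestroyed_alt mass asteroids
instance (mass : Int) (asteroids : List Int) (out : Bool) : Decidable (Spec_asteroidsDestroyed mass asteroids out) := by unfold Spec_asteroidsDestroyed; infer_instance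

-- ===== CLAIM (what is proved, stated in full; the proofs are below) =====
def Claim_equal_asteroidsDestroyed : Prop := ∀ (mass : Int) (asteroids : List Int), Dom_asteroidsDestroyed mass asteroids → Spec_asteroidsDestroyed mass asteroids (asteroidsDestroyed mass asteroids)

-- ===== LEMMAS AND PROOFS =====
-- structural form of B's backward fold
def pvNeed : List Int → Option Int
  | [] => none
  | a :: rest =>
    match pvNeed rest with
    | none => some a
    | some n => some (max a (n - a))

theorem pvFoldl_reverse_eq_pvNeed (xs : List Int) :
    xs.reverse.foldl
      (fun acc a => match acc with
        | none => some a
        | some n => some (max a (n - a))) (none : Option Int) = pvNeed xs := by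
  induction xs with
  | nil => simp [pvNeed]
  | cons a rest ih =>
    simp [List.reverse_cons, List.foldl_append, ih, pvNeed]

-- A's fused greedy equals "compare mass with the max deficit"
theorem pvALoop_eq_need (m : Int) (xs : List Int) :
    pvALoop [m] xs = (match pvNeed xs with
      | none => true
      | some n => decide (m ≥ n)) := by
  induction xs generalizing m with
  | nil => simp [pvALoop, pvNeed]
  | cons a rest ih =>
    simp only [pvALoop, PySem.List.pyGet?, PySem.List.pyIdx?, pvNeed]
    have := ih (m + a)
    by_cases h : m < a
    · cases hn : pvNeed rest <;> simp [h, hn, pvALoop] <;> omega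
    · cases hn : pvNeed rest <;>
        simp [h, hn, List.dropLast, ih (m + a)] <;> omega

-- ===== VERDICT (by name: the statement is the Claim_ definition above) =====
theorem asteroidsDestroyed_spec : Claim_equal_asteroidsDestroyed := by
  intro mass asteroids _
  unfold Spec_asteroidsDestroyed asteroidsDestroyed asteroidsDestroyed_alt
  simp only [pvFoldl_reverse_eq_pvNeed]
  exact pvALoop_eq_need mass (PySem.List.sorted asteroids (fun x => x))
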